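-- pv_equiv track=rewrite | github.com/hwkim3330/lidar-tas260226 | scripts/generate_packet_layout_graphs.py | ip_fragments_udp_payload
-- ===== SOURCE A (Python) =====
-- def ip_fragments_udp_payload(payload_bytes: int, mtu: int = 1500) -> list[int]:
--     # Fragment payload is IP payload bytes. First fragment includes UDP header (8B).
--     udp_len = payload_bytes + 8
--     max_ip_payload = mtu - 20  # IPv4 header 20B
--     out = []
--     rem = udp_len
--     while rem > 0:
--         x = min(max_ip_payload, rem)
--         out.append(x)
--         rem -= x
--     return out
-- ===== SOURCE B (Python) =====
-- def ip_fragments_udp_payload(payload_bytes: int, mtu: int = 1500) -> list[int]: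
--     udp_len = payload_bytes + 8
--     if udp_len <= 0:
--         return []
--     max_ip_payload = mtu - 20
--     q, r = divmod(udp_len, max_ip_payload)
--     return [max_ip_payload] * q + ([r] if r else [])
-- ===== Notes on version B (the rewrite author's own statement) =====
-- stated objective: simpler
-- what changed: Replaces the per-fragment while-loop with a closed form: divmod gives the number of full-size fragments and the remainder, so the result is [max_ip_payload]*q plus the remainder if nonzero.
import Mathlib
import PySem

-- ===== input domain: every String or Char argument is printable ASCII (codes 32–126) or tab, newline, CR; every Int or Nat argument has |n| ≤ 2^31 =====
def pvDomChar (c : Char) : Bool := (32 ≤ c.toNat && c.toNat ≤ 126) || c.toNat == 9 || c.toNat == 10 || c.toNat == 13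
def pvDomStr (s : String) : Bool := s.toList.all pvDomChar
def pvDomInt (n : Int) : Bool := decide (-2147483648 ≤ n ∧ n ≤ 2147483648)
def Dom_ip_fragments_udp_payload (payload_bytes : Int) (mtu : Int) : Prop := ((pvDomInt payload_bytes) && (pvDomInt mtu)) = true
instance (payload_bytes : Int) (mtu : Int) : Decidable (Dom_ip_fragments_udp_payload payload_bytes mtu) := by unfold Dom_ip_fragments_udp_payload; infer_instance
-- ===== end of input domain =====

-- B replaces A's per-fragment while-loop with closed-form divmod arithmetic (objective: simpler).


-- ===== PORT A =====
-- the while-loop of A; fuel only makes the recursion total (inside Pre_ each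
-- iteration subtracts at least 1, so fuel = udp_len.toNat never runs out)
def ipfragLoop (maxp : Int) : Nat → Int → List Int → List Int
  | 0, _, out => out.reverse
  | fuel + 1, rem, out =>
    if rem > 0 then
      let x := min maxp rem
      ipfragLoop maxp fuel (rem - x) (x :: out)
    else out.reverse

def ip_fragments_udp_payload (payload_bytes : Int) (mtu : Int) : List Int :=
  let udp_len := payload_bytes + 8
  let max_ip_payload := mtu - 20
  ipfragLoop max_ip_payload udp_len.toNat udp_len []

-- ===== PORT B =====
def ip_fragments_udp_payload_alt (payload_bytes : Int) (mtu : Int) : List Int :=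
  let udp_len := payload_bytes + 8
  if udp_len ≤ 0 then []
  else
    let max_ip_payload := mtu - 20
    let q := PySem.Int.floordiv udp_len max_ip_payload
    let r := PySem.Int.mod udp_len max_ip_payload
    List.replicate q.toNat max_ip_payload ++ (if r ≠ 0 then [r] else [])

-- ===== PRECONDITION & SPEC =====
-- Pre_ excludes exactly the degenerate inputs (mtu ≤ 20 with a positive UDP length)
-- on which A's while-loop never terminates (x ≤ 0, so rem never decreases).
def Pre_ip_fragments_udp_payload (payload_bytes : Int) (mtu : Int) : Prop :=
  payload_bytes + 8 ≤ 0 ∨ 21 ≤ mtu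
instance (payload_bytes : Int) (mtu : Int) : Decidable (Pre_ip_fragments_udp_payload payload_bytes mtu) := by unfold Pre_ip_fragments_udp_payload; infer_instance
def pvWitness_ip_fragments_udp_payload : Int × Int := (3000, 1500)

def Spec_ip_fragments_udp_payload (payload_bytes : Int) (mtu : Int) (out : List Int) : Prop := out = ip_fragments_udp_payload_alt payload_bytes mtu
instance (payload_bytes : Int) (mtu : Int) (out : List Int) : Decidable (Spec_ip_fragments_udp_payload payload_bytes mtu out) := by unfold Spec_ip_fragments_udp_payload; infer_instance

-- ===== CLAIM (what is proved, stated in full; the proofs are below) =====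
def Claim_equal_ip_fragments_udp_payload : Prop := ∀ (payload_bytes : Int) (mtu : Int), Dom_ip_fragments_udp_payload payload_bytes mtu → Pre_ip_fragments_udp_payload payload_bytes mtu → Spec_ip_fragments_udp_payload payload_bytes mtu (ip_fragments_udp_payload payload_bytes mtu)

-- ===== LEMMAS AND PROOFS =====

-- closed form for one run of the loop body family
def ipfragSpec (maxp rem : Int) : List Int :=
  List.replicate (rem / maxp).toNat maxp ++ (if rem % maxp ≠ 0 then [rem % maxp] else [])

lemma ipfragLoop_eq (maxp : Int) (hm : 1 ≤ maxp) :
    ∀ (fuel : Nat) (rem : Int) (out : List Int), 0 ≤ rem → rem.toNat ≤ fuel →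
      ipfragLoop maxp fuel rem out = out.reverse ++ ipfragSpec maxp rem := by
  intro fuel
  induction fuel with
  | zero =>
    intro rem out h0 hle
    have : rem = 0 := by omega
    subst this
    simp [ipfragLoop, ipfragSpec]
  | succ f ih =>
    intro rem out h0 hle
    by_cases hpos : rem > 0
    · rw [ipfragLoop, if_pos hpos]
      by_cases hge : maxp ≤ rem
      · have hx : min maxp rem = maxp := min_eq_left hge
        rw [hx]
        rw [ih (rem - maxp) (maxp :: out) (by omega) (by omega)]
        simp only [List.reverse_cons, List.append_assoc]
        congr 1
        -- [maxp] ++ ipfragSpec maxp (rem - maxp) = ipfragSpec maxp rem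
        have hdiv : rem / maxp = (rem - maxp) / maxp + 1 := by
          have := Int.add_mul_ediv_right (rem - maxp) 1 (by omega : maxp ≠ 0)
          simp at this
          omega
        have hmod : rem % maxp = (rem - maxp) % maxp := by
          conv_lhs => rw [show rem = rem - maxp + maxp * 1 by ring]
          rw [Int.add_mul_emod_self_left]
        have hq0 : 0 ≤ (rem - maxp) / maxp := Int.ediv_nonneg (by omega) (by omega)
        unfold ipfragSpec
        rw [hdiv, hmod]
        rw [show ((rem - maxp) / maxp + 1).toNat = ((rem - maxp) / maxp).toNat + 1 by omega]
        rw [List.replicate_succ]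
        simp
      · have hx : min maxp rem = rem := min_eq_right (by omega)
        rw [hx]
        simp only [sub_self]
        rw [ih 0 (rem :: out) le_rfl (by omega)]
        simp only [List.reverse_cons, List.append_assoc]
        congr 1
        have hdiv : rem / maxp = 0 := Int.ediv_eq_zero_of_lt h0 (by omega)
        have hmod : rem % maxp = rem := Int.emod_eq_of_lt h0 (by omega)
        unfold ipfragSpec
        rw [hdiv, hmod]
        simp [show rem ≠ 0 by omega]

    · rw [ipfragLoop, if_neg hpos]
      have : rem = 0 := by omega
      subst this
      simp [ipfragSpec]

-- ===== VERDICT (by name: the statement is the Claim_ definition above) =====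
theorem ip_fragments_udp_payload_spec : Claim_equal_ip_fragments_udp_payload := by
  intro p m _ hpre
  unfold Spec_ip_fragments_udp_payload ip_fragments_udp_payload ip_fragments_udp_payload_alt
  by_cases hneg : p + 8 ≤ 0
  · have : (p + 8).toNat = 0 := by omega
    simp [this, ipfragLoop, hneg]
  · have hm : 21 ≤ m := by
      rcases hpre with h | h
      · omega
      · exact h
    have hmp : 1 ≤ m - 20 := by omega
    have h0 : 0 ≤ p + 8 := by omega
    rw [ipfragLoop_eq (m - 20) hmp (p + 8).toNat (p + 8) [] h0 le_rfl]
    simp only [List.reverse_nil, List.nil_append]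
    unfold ipfragSpec
    rw [PySem.Int.floordiv_eq_ediv_of_pos (by omega : (0:Int) < m - 20),
        PySem.Int.mod_eq_emod_of_pos (by omega : (0:Int) < m - 20)]
    simp [hneg]
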